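-- pv_equiv track=rewrite | github.com/artbohr/Codewars-Algorithms-Python- | 7-kyu/upper-strength.py | alex_mistakes
-- ===== SOURCE A (Python) =====
-- def alex_mistakes(number_of_katas, time_limit):
--     req_time = 5
--     sets = 0
--     remaining = time_limit - number_of_katas * 6
--
--     while remaining>=req_time:
--         remaining-=req_time
--         req_time*=2
--         sets+=1
--
--     return sets
-- ===== SOURCE B (Python) =====
-- def alex_mistakes(number_of_katas, time_limit):
--     remaining = time_limit - number_of_katas * 6
--     if remaining < 5:
--         return 0
--     return (remaining // 5 + 1).bit_length() - 1
-- ===== Notes on version B (the rewrite author's own statement) =====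
-- stated objective: simpler
-- what changed: Replaces the subtract-and-double while loop by a closed form: after s sets the time used is 5*(2^s-1), so the answer is bit_length(remaining//5 + 1) - 1 (0 when remaining < 5).
import Mathlib
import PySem

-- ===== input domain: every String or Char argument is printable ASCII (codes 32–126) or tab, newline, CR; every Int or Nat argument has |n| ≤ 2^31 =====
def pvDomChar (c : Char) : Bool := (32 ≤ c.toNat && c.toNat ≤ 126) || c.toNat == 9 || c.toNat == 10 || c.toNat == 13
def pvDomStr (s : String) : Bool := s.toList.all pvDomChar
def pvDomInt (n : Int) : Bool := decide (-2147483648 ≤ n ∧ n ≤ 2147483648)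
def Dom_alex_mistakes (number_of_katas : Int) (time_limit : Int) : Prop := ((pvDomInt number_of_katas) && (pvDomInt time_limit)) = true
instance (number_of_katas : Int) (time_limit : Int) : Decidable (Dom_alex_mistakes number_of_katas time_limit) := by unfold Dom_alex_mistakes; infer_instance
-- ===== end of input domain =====

-- B replaces A's subtract-and-double while loop by the closed form bit_length(remaining//5+1)-1 (simpler, O(1)).


-- ===== PORT A =====
-- the while loop; the '0 < req_time' part of the guard is only a totality guard
-- (req_time starts at 5 and only doubles, so it is always satisfied alongside the Python guard)
def alexLoop (req_time : Int) (remaining : Int) (sets : Int) : Int :=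
  if h : 0 < req_time ∧ req_time ≤ remaining then
    alexLoop (req_time * 2) (remaining - req_time) (sets + 1)
  else
    sets
termination_by remaining.toNat
decreasing_by omega

def alex_mistakes (number_of_katas : Int) (time_limit : Int) : Int :=
  alexLoop 5 (time_limit - number_of_katas * 6) 0

-- ===== PORT B =====
def alex_mistakes_alt (number_of_katas : Int) (time_limit : Int) : Int :=
  let remaining := time_limit - number_of_katas * 6
  if remaining < 5 then 0
  else (PySem.Int.bitLength (PySem.Int.floordiv remaining 5 + 1) : Int) - 1

-- ===== PRECONDITION & SPEC =====
def Spec_alex_mistakes (number_of_katas : Int) (time_limit : Int) (out : Int) : Prop := out = alex_mistakes_alt number_of_katas time_limit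
instance (number_of_katas : Int) (time_limit : Int) (out : Int) : Decidable (Spec_alex_mistakes number_of_katas time_limit out) := by unfold Spec_alex_mistakes; infer_instance

-- ===== CLAIM (what is proved, stated in full; the proofs are below) =====
def Claim_equal_alex_mistakes : Prop := ∀ (number_of_katas : Int) (time_limit : Int), Dom_alex_mistakes number_of_katas time_limit → Spec_alex_mistakes number_of_katas time_limit (alex_mistakes number_of_katas time_limit)

-- ===== LEMMAS AND PROOFS =====

-- bitLength on a positive Nat cast is log2 + 1
theorem pv_bitLength_eq_log2 (m : Nat) (hm : 0 < m) :
    PySem.Int.bitLength (m : Int) = Nat.log2 m + 1 := by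
  induction m using Nat.strong_induction_on with
  | _ m ih =>
    rcases Nat.lt_or_ge m 2 with h2 | h2
    · interval_cases m
      decide
    · rw [PySem.Int.bitLength_natCast hm, ih (m / 2) (by omega) (by omega)]
      have h := Nat.log2_def m
      rw [if_pos h2] at h
      omega

-- floordiv r t ≤ 0 when r < t (t > 0), so the log2 term vanishes
theorem pv_log2_small (t r : Int) (ht : 0 < t) (hlt : r < t) :
    Nat.log2 (PySem.Int.floordiv r t + 1).toNat = 0 := by
  have hq : PySem.Int.floordiv r t < 1 := by
    rw [PySem.Int.floordiv_lt_iff_lt_mul ht]; omega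
  have : (PySem.Int.floordiv r t + 1).toNat = 0 ∨
      (PySem.Int.floordiv r t + 1).toNat = 1 := by omega
  rcases this with h | h <;> rw [h] <;> decide

-- the loop step on the closed form: dividing the quotient sequence by 2
theorem pv_floordiv_step (t r : Int) (ht : 0 < t) :
    PySem.Int.floordiv (r - t) (2 * t) + 1 =
      PySem.Int.floordiv (PySem.Int.floordiv r t + 1) 2 := by
  have h2t : (0:Int) < 2 * t := by omega
  rw [PySem.Int.floordiv_eq_ediv_of_pos h2t,
      PySem.Int.floordiv_eq_ediv_of_pos ht,
      PySem.Int.floordiv_eq_ediv_of_pos (by omega : (0:Int) < 2)]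
  have e1 : (r - t) / (2 * t) = (r - t) / t / 2 := by
    rw [Int.ediv_ediv_of_nonneg (by omega : (0:Int) ≤ t), mul_comm]
  have e2 : (r - t) / t = r / t + (-1) := by
    have := Int.add_mul_ediv_right r (-1) (by omega : t ≠ 0)
    simpa [sub_eq_add_neg] using this
  have e3 : (r / t + 1) / 2 = (r / t + (-1)) / 2 + 1 := by
    have := Int.add_mul_ediv_right (r / t + (-1)) 1 (by omega : (2:Int) ≠ 0)
    rw [show r / t + 1 = r / t + (-1) + 1 * 2 by ring, this]
  rw [e1, e2, e3]

theorem pv_loop_eq (n : Nat) : ∀ (t r s : Int), 0 < t → r.toNat < n →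
    alexLoop t r s = s + (Nat.log2 (PySem.Int.floordiv r t + 1).toNat : Int) := by
  induction n with
  | zero => intro t r s _ h; omega
  | succ n ih =>
    intro t r s ht hn
    rw [alexLoop]
    by_cases hg : t ≤ r
    · have hq1 : 1 ≤ PySem.Int.floordiv r t := by
        rw [PySem.Int.le_floordiv_iff_mul_le ht]; omega
      rw [dif_pos ⟨ht, hg⟩, ih (t * 2) (r - t) (s + 1) (by omega) (by omega)]
      rw [show t * 2 = 2 * t by ring, pv_floordiv_step t r ht]
      -- reduce the Int floordiv by 2 to Nat division
      set q : Int := PySem.Int.floordiv r t with hqdef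
      have hm : (q + 1) = ((q + 1).toNat : Int) := by omega
      have hdiv : PySem.Int.floordiv (q + 1) 2 = (((q + 1).toNat / 2 : Nat) : Int) := by
        rw [hm]; exact_mod_cast PySem.Int.floordiv_natCast (q + 1).toNat 2
      rw [hdiv]
      have hlog : Nat.log2 ((q + 1).toNat) = Nat.log2 ((q + 1).toNat / 2) + 1 := by
        rw [Nat.log2_def]; simp [show 2 ≤ (q + 1).toNat by omega]
      rw [hlog]
      rw [Int.toNat_natCast]
      push_cast
      ring
    · rw [dif_neg (by omega)]
      rw [pv_log2_small t r ht (by omega)]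
      simp

-- ===== VERDICT (by name: the statement is the Claim_ definition above) =====
theorem alex_mistakes_spec : Claim_equal_alex_mistakes := by
  intro k t _
  unfold Spec_alex_mistakes alex_mistakes alex_mistakes_alt
  set r : Int := t - k * 6 with hr
  rw [pv_loop_eq (r.toNat + 1) 5 r 0 (by omega) (by omega)]
  by_cases h5 : r < 5
  · rw [if_pos h5, pv_log2_small 5 r (by omega) h5]
    simp
  · rw [if_neg h5]
    have hq1 : 1 ≤ PySem.Int.floordiv r 5 := by
      rw [PySem.Int.le_floordiv_iff_mul_le (by omega : (0:Int) < 5)]; omega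
    set q : Int := PySem.Int.floordiv r 5 with hq
    have hm : q + 1 = (((q + 1).toNat : Nat) : Int) := by omega
    rw [hm, pv_bitLength_eq_log2 (q + 1).toNat (by omega), Int.toNat_natCast]
    push_cast
    ring
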